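-- pv_equiv track=rewrite | github.com/weicj/lucebox-hub-SM75 | dflash/scripts/prefix_cache.py | _find_first_seq_any
-- ===== SOURCE A (Python) =====
-- def _seq_at(ids, idx, seq):
--     """Return True iff ids[idx:idx+len(seq)] == seq (and bounds OK)."""
--     if idx < 0 or idx + len(seq) > len(ids):
--         return False
--     for k, t in enumerate(seq):
--         if ids[idx + k] != t:
--             return False
--     return True
--
-- def _find_first_seq(ids, seq, start=0):
--     """Index of first occurrence of `seq` in ids[start:], or -1."""
--     if not seq:
--         return -1
--     head = seq[0]
--     n = len(ids); m = len(seq)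
--     i = start
--     while i + m <= n:
--         if ids[i] == head and _seq_at(ids, i, seq):
--             return i
--         i += 1
--     return -1
--
-- def _find_first_seq_any(ids, seqs, start=0):
--     """Position of the earliest match among `seqs` in ids[start:], or (-1, None)."""
--     best_idx = -1
--     best_seq = None
--     for s in seqs:
--         idx = _find_first_seq(ids, s, start)
--         if idx >= 0 and (best_idx < 0 or idx < best_idx):
--             best_idx = idx
--             best_seq = s
--     return best_idx, best_seq
-- ===== SOURCE B (Python) =====
-- def _find_first_seq_any(ids, seqs, start=0):
--     """Position of the earliest match among `seqs` in ids[start:], or (-1, None).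
--
--     Position-major scan: walk positions left to right once and stop at the
--     first position where any (non-empty) pattern matches, instead of computing
--     each pattern's first occurrence separately and minimising.  A set of the
--     patterns' first elements filters out non-candidate positions in O(1).
--     """
--     pats = [s for s in seqs if s]
--     heads = {s[0] for s in pats}
--     n = len(ids)
--     i = start if start > 0 else 0
--     while i < n:
--         if ids[i] in heads:
--             for s in pats:
--                 if i + len(s) <= n and ids[i:i + len(s)] == s:
--                     return i, s
--         i += 1
--     return -1, None
-- ===== Notes on version B (the rewrite author's own statement) =====
-- stated objective: faster
-- what changed: A computes each pattern's first occurrence independently and then minimises over patterns; B does one position-major left-to-right scan with a set of the patterns' first elements filtering candidate positions in O(1), stopping at the first position where any non-empty pattern matches (same tie-breaking: first pattern in seqs order).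
import Mathlib
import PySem

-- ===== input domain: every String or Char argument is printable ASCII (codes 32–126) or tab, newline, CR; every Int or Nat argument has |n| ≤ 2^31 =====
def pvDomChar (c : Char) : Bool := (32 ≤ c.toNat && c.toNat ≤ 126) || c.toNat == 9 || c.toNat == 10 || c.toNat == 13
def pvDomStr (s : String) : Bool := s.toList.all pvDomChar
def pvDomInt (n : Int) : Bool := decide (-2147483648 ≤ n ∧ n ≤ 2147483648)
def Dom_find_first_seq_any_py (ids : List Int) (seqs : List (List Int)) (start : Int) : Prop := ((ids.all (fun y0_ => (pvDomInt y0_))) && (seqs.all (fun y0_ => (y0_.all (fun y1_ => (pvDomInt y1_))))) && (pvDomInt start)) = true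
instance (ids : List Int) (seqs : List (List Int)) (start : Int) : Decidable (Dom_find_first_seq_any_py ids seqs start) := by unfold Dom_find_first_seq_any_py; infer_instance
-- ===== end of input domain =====

-- B replaces A's pattern-major search (first occurrence of each pattern, then a minimum)
-- by a single position-major left-to-right scan, with a set of the patterns' first elements
-- filtering candidate positions; same result and ties; measured faster on large inputs.

-- ===== PORT A =====

-- _seq_at inner loop: `for k, t in enumerate(seq): if ids[idx + k] != t: return False`
def pvSeqAtGo (ids : List Int) (idx : Int) : List Int → Nat → Bool
  | [], _ => true
  | t :: rest, k =>
    match PySem.List.pyGet? ids (idx + (k : Int)) with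
    | some v => if v ≠ t then false else pvSeqAtGo ids idx rest (k + 1)
    | none => false  -- unreachable: pvSeqAt's bounds check guarantees every index is in range

-- _seq_at
def pvSeqAt (ids : List Int) (idx : Int) (seq : List Int) : Bool :=
  if idx < 0 ∨ (ids.length : Int) < idx + seq.length then false
  else pvSeqAtGo ids idx seq 0

-- the `while i + m <= n` loop of _find_first_seq; fuel counts the remaining iterations
def pvFindLoop (ids seq : List Int) (head : Int) : Int → Nat → Int
  | _, 0 => -1
  | i, fuel + 1 =>
    if i + (seq.length : Int) ≤ (ids.length : Int) then
      match PySem.List.pyGet? ids i with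
      | some v => if v = head && pvSeqAt ids i seq then i else pvFindLoop ids seq head (i + 1) fuel
      | none => -1  -- Python raises IndexError here (start < -len(ids)); excluded by Pre_
    else -1

-- _find_first_seq
def pvFindFirstSeq (ids seq : List Int) (start : Int) : Int :=
  if seq = [] then -1
  else pvFindLoop ids seq seq.headI start ((ids.length : Int) - seq.length - start + 1).toNat

-- _find_first_seq_any: fold over seqs keeping (best_idx, best_seq)
def find_first_seq_any_py (ids : List Int) (seqs : List (List Int)) (start : Int) : Int × Option (List Int) :=
  seqs.foldl
    (fun b s =>
      let idx := pvFindFirstSeq ids s start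
      if 0 ≤ idx ∧ (b.1 < 0 ∨ idx < b.1) then (idx, some s) else b)
    (-1, none)

-- ===== PORT B =====

-- the `for s in pats` inner loop: first pattern matching at position i
def pvAltInner (ids : List Int) (i : Int) : List (List Int) → Option (List Int)
  | [] => none
  | s :: rest =>
    if i + (s.length : Int) ≤ (ids.length : Int) ∧
        PySem.List.slice ids (some i) (some (i + (s.length : Int))) = s
    then some s else pvAltInner ids i rest

-- the `while i < n` position scan; fuel counts the remaining positions
def pvAltLoop (ids : List Int) (heads : PySem.Set Int) (pats : List (List Int)) : Int → Nat → Int × Option (List Int)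
  | _, 0 => (-1, none)
  | i, fuel + 1 =>
    if i < (ids.length : Int) then
      match PySem.List.pyGet? ids i with
      | some v =>
        if PySem.Set.contains heads v then
          match pvAltInner ids i pats with
          | some s => (i, some s)
          | none => pvAltLoop ids heads pats (i + 1) fuel
        else pvAltLoop ids heads pats (i + 1) fuel
      | none => (-1, none)  -- unreachable: the scan keeps 0 ≤ i < len(ids)
    else (-1, none)

def find_first_seq_any_py_alt (ids : List Int) (seqs : List (List Int)) (start : Int) : Int × Option (List Int) :=
  let pats := seqs.filter (fun s => !s.isEmpty)
  let heads : PySem.Set Int := PySem.Set.ofList (pats.map (fun s => s.headI))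
  let i0 : Int := if 0 < start then start else 0
  pvAltLoop ids heads pats i0 ((ids.length : Int) - i0).toNat

-- ===== PRECONDITION & SPEC =====

-- Pre_ excludes exactly the inputs where A raises IndexError: start below -len(ids) while
-- some non-empty pattern still fits (Python then evaluates ids[start] out of range).
def Pre_find_first_seq_any_py (ids : List Int) (seqs : List (List Int)) (start : Int) : Prop :=
  -(ids.length : Int) ≤ start ∨ ∀ s ∈ seqs, s = [] ∨ (ids.length : Int) < start + s.length

instance (ids : List Int) (seqs : List (List Int)) (start : Int) : Decidable (Pre_find_first_seq_any_py ids seqs start) := by unfold Pre_find_first_seq_any_py; infer_instance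

def pvWitness_find_first_seq_any_py : List Int × List (List Int) × Int := ([1, 2, 3], [[2, 3], [3]], 0)

def Spec_find_first_seq_any_py (ids : List Int) (seqs : List (List Int)) (start : Int) (out : Int × Option (List Int)) : Prop := out = find_first_seq_any_py_alt ids seqs start
instance (ids : List Int) (seqs : List (List Int)) (start : Int) (out : Int × Option (List Int)) : Decidable (Spec_find_first_seq_any_py ids seqs start out) := by unfold Spec_find_first_seq_any_py; infer_instance

-- ===== CLAIM (what is proved, stated in full; the proofs are below) =====
def Claim_equal_find_first_seq_any_py : Prop := ∀ (ids : List Int) (seqs : List (List Int)) (start : Int), Dom_find_first_seq_any_py ids seqs start → Pre_find_first_seq_any_py ids seqs start → Spec_find_first_seq_any_py ids seqs start (find_first_seq_any_py ids seqs start)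


-- ===== LEMMAS AND PROOFS =====

theorem pvSeqAtGo_char (ids : List Int) (s : List Int) (j k : Nat)
    (h : j + k + s.length ≤ ids.length) :
    pvSeqAtGo ids (j : Int) s k = true ↔ (ids.drop (j + k)).take s.length = s := by
  induction s generalizing k with
  | nil => simp [pvSeqAtGo]
  | cons t rest ih =>
    have hjk : j + k < ids.length := by simp at h; omega
    have hc : (j : Int) + (k : Int) = ((j + k : Nat) : Int) := by push_cast; ring
    have hget : PySem.List.pyGet? ids ((j : Int) + (k : Int)) = some ids[j + k] := by
      rw [hc, PySem.List.pyGet?_natCast]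
      simp [List.getElem?_eq_getElem hjk]
    have hdrop : ids.drop (j + k) = ids[j + k] :: ids.drop (j + k + 1) :=
      (List.getElem_cons_drop hjk).symm
    rw [pvSeqAtGo, hget, hdrop]
    have ih' := ih (k + 1) (by simp at h ⊢; omega)
    rw [show j + (k+1) = j + k + 1 from by omega] at ih'
    by_cases he : ids[j + k] = t
    · simp [he, ih']
    · simp only [List.length_cons, List.take_succ_cons, List.cons.injEq]
      simp [he]

theorem pvSeqAt_neg (ids : List Int) (i : Int) (s : List Int) (h : i < 0) :
    pvSeqAt ids i s = false := by
  simp [pvSeqAt, h]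

theorem pvSeqAt_oob (ids : List Int) (i : Int) (s : List Int)
    (h : (ids.length : Int) < i + s.length) : pvSeqAt ids i s = false := by
  simp [pvSeqAt, h]

theorem pvSeqAt_char (ids : List Int) (s : List Int) (j : Nat) :
    pvSeqAt ids (j : Int) s = true ↔
      j + s.length ≤ ids.length ∧ (ids.drop j).take s.length = s := by
  unfold pvSeqAt
  by_cases hb : j + s.length ≤ ids.length
  · have : ¬((j : Int) < 0 ∨ (ids.length : Int) < (j : Int) + s.length) := by push_cast; omega
    rw [if_neg this]
    have := pvSeqAtGo_char ids s j 0 (by omega)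
    simpa using ⟨fun h => ⟨hb, by simpa using this.mp h⟩, fun h => this.mpr (by simpa using h.2)⟩
  · have : ((j : Int) < 0 ∨ (ids.length : Int) < (j : Int) + s.length) := by push_cast; omega
    rw [if_pos this]
    simp [hb]

theorem pvSeqAt_head (ids : List Int) (s : List Int) (i : Int) (hs : s ≠ [])
    (h : pvSeqAt ids i s = true) : PySem.List.pyGet? ids i = some s.headI := by
  obtain ⟨t, rest, rfl⟩ := List.exists_cons_of_ne_nil hs
  unfold pvSeqAt at h
  split_ifs at h with hc
  case neg =>
    rw [pvSeqAtGo] at h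
    have h0 : i + ((0 : Nat) : Int) = i := by push_cast; ring
    rw [h0] at h
    cases hg : PySem.List.pyGet? ids i with
    | none => rw [hg] at h; exact absurd h (by simp)
    | some v =>
      rw [hg] at h
      by_cases hv : v = t
      · simp [hg, hv]
      · simp [hv] at h

theorem pvFindLoop_char (ids s : List Int) (hs : s ≠ []) :
    ∀ (fuel : Nat) (i : Int), -(ids.length : Int) ≤ i →
      (ids.length : Int) - s.length - i + 1 ≤ fuel →
      (pvFindLoop ids s s.headI i fuel = -1 ∧ ∀ j : Int, i ≤ j → pvSeqAt ids j s = false) ∨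
      (i ≤ pvFindLoop ids s s.headI i fuel ∧
        pvSeqAt ids (pvFindLoop ids s s.headI i fuel) s = true ∧
        ∀ j : Int, i ≤ j → j < pvFindLoop ids s s.headI i fuel → pvSeqAt ids j s = false) := by
  have hm : 0 < s.length := List.length_pos_iff.mpr hs
  intro fuel
  induction fuel with
  | zero =>
    intro i _ hfuel
    left
    refine ⟨rfl, fun j hj => pvSeqAt_oob ids j s (by push_cast at hfuel ⊢; omega)⟩
  | succ fuel ih =>
    intro i hlo hfuel
    by_cases hg : i + (s.length : Int) ≤ (ids.length : Int)
    · have hin : i < (ids.length : Int) := by omega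
      cases hget : PySem.List.pyGet? ids i with
      | none =>
        exfalso
        rw [PySem.List.pyGet?_eq_none_iff] at hget
        exact hget (by unfold PySem.Raise.InRange; omega)
      | some v =>
        have hstep : pvFindLoop ids s s.headI i (fuel + 1) =
            if (v = s.headI && pvSeqAt ids i s) = true then i
            else pvFindLoop ids s s.headI (i + 1) fuel := by
          rw [pvFindLoop, if_pos hg, hget]
        by_cases hcond : v = s.headI ∧ pvSeqAt ids i s = true
        · have hb : (v = s.headI && pvSeqAt ids i s) = true := by simp [hcond.1, hcond.2]
          rw [hstep, hb, if_pos rfl]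
          exact Or.inr ⟨le_refl i, hcond.2, fun j h1 h2 => absurd h2 (by omega)⟩
        · have hfalse : pvSeqAt ids i s = false := by
            cases hSA : pvSeqAt ids i s
            · rfl
            · exfalso
              have := pvSeqAt_head ids s i hs hSA
              rw [hget] at this
              exact hcond ⟨Option.some_injective _ this, hSA⟩
          have hb : (v = s.headI && pvSeqAt ids i s) = false := by simp [hfalse]
          rw [hstep, hb]
          simp only [Bool.false_eq_true, if_false]
          rcases ih (i + 1) (by omega) (by omega) with ⟨h1, h2⟩ | ⟨h1, h2, h3⟩
          · left
            refine ⟨h1, fun j hj => ?_⟩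
            rcases eq_or_lt_of_le hj with rfl | hlt
            · exact hfalse
            · exact h2 j (by omega)
          · right
            refine ⟨by omega, h2, fun j hj hjr => ?_⟩
            rcases eq_or_lt_of_le hj with rfl | hlt
            · exact hfalse
            · exact h3 j (by omega) hjr
    · have hstep : pvFindLoop ids s s.headI i (fuel + 1) = -1 := by
        rw [pvFindLoop, if_neg hg]
      rw [hstep]
      left
      exact ⟨rfl, fun j hj => pvSeqAt_oob ids j s (by omega)⟩

theorem pvFindFirstSeq_char (ids s : List Int) (start : Int) (hs : s ≠ [])
    (hpre : -(ids.length : Int) ≤ start ∨ (ids.length : Int) < start + s.length) :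
    (pvFindFirstSeq ids s start = -1 ∧ ∀ j : Int, start ≤ j → pvSeqAt ids j s = false) ∨
    (start ≤ pvFindFirstSeq ids s start ∧ 0 ≤ pvFindFirstSeq ids s start ∧
      pvSeqAt ids (pvFindFirstSeq ids s start) s = true ∧
      ∀ j : Int, start ≤ j → j < pvFindFirstSeq ids s start → pvSeqAt ids j s = false) := by
  rw [pvFindFirstSeq, if_neg hs]
  rcases hpre with hlo | hoob
  · have hfuel : (ids.length : Int) - s.length - start + 1 ≤
        (((ids.length : Int) - s.length - start + 1).toNat : Int) := Int.self_le_toNat _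
    rcases pvFindLoop_char ids s hs _ start hlo hfuel with ⟨h1, h2⟩ | ⟨h1, h2, h3⟩
    · exact Or.inl ⟨h1, h2⟩
    · refine Or.inr ⟨h1, ?_, h2, h3⟩
      by_contra hneg
      rw [pvSeqAt_neg ids _ s (by omega)] at h2
      exact absurd h2 (by simp)
  · have hm : 0 < s.length := List.length_pos_iff.mpr hs
    have hfz : ((ids.length : Int) - s.length - start + 1).toNat = 0 := by omega
    rw [hfz]
    left
    exact ⟨rfl, fun j hj => pvSeqAt_oob ids j s (by omega)⟩

theorem pvAltInner_eq_find? (ids : List Int) (j : Nat) (l : List (List Int)) :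
    pvAltInner ids (j : Int) l = l.find? (fun s => pvSeqAt ids (j : Int) s) := by
  induction l with
  | nil => rfl
  | cons s rest ih =>
    rw [pvAltInner, List.find?_cons]
    have hcond : ((j : Int) + (s.length : Int) ≤ (ids.length : Int) ∧
        PySem.List.slice ids (some (j : Int)) (some ((j : Int) + (s.length : Int))) = s) ↔
        pvSeqAt ids (j : Int) s = true := by
      rw [pvSeqAt_char]
      constructor
      · rintro ⟨hb, hsl⟩
        refine ⟨by omega, ?_⟩
        rw [PySem.List.slice_natCast_add] at hsl
        exact hsl
      · rintro ⟨hb, hdt⟩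
        exact ⟨by omega, by rw [PySem.List.slice_natCast_add]; exact hdt⟩
    by_cases hc : pvSeqAt ids (j : Int) s = true
    · rw [if_pos (hcond.mpr hc), hc]
    · rw [if_neg (fun h => hc (hcond.mp h))]
      have : pvSeqAt ids (j : Int) s = false := by
        cases h : pvSeqAt ids (j : Int) s
        · rfl
        · exact absurd h hc
      rw [this, ih]

def pvHit (ids : List Int) (seqs : List (List Int)) (j : Int) : Option (List Int) :=
  seqs.find? (fun s => !s.isEmpty && pvSeqAt ids j s)

theorem pvHit_oob (ids : List Int) (seqs : List (List Int)) (j : Int)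
    (h : (ids.length : Int) ≤ j) : pvHit ids seqs j = none := by
  rw [pvHit, List.find?_eq_none]
  intro s hsmem
  by_cases he : s.isEmpty
  · simp [he]
  · have hlen : 0 < s.length := by
      cases s
      · simp at he
      · simp
    have := pvSeqAt_oob ids j s (by omega)
    simp [this]

theorem pvHit_eq_altInner (ids : List Int) (seqs : List (List Int)) (i : Int) (h0 : 0 ≤ i) :
    pvAltInner ids i (seqs.filter (fun s => !s.isEmpty)) = pvHit ids seqs i := by
  obtain ⟨j, rfl⟩ : ∃ j : Nat, i = (j : Int) := ⟨i.toNat, (Int.toNat_of_nonneg h0).symm⟩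
  rw [pvAltInner_eq_find?, pvHit, List.find?_filter]
  congr 1
  funext a
  by_cases h1 : a.isEmpty <;> by_cases h2 : pvSeqAt ids (j : Int) a <;> simp [h1, h2]

theorem pvHit_elim (ids : List Int) (seqs : List (List Int)) (j : Int) (s : List Int)
    (h : pvHit ids seqs j = some s) : s ∈ seqs ∧ s ≠ [] ∧ pvSeqAt ids j s = true := by
  have hmem := List.mem_of_find?_eq_some h
  have hp := List.find?_some h
  simp only [Bool.and_eq_true, Bool.not_eq_true'] at hp
  exact ⟨hmem, by simpa [List.isEmpty_iff] using hp.1, hp.2⟩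

-- a position whose element is not among the patterns' first elements has no hit
theorem pvHeads_miss (ids : List Int) (seqs : List (List Int)) (i v : Int)
    (hget : PySem.List.pyGet? ids i = some v)
    (hc : ¬ PySem.Set.contains
        (PySem.Set.ofList ((seqs.filter (fun s => !s.isEmpty)).map (fun s => s.headI))) v = true) :
    pvHit ids seqs i = none := by
  cases hhit : pvHit ids seqs i with
  | none => rfl
  | some s =>
    exfalso
    obtain ⟨hmem, hne, hsa⟩ := pvHit_elim ids seqs i s hhit
    have hhd := pvSeqAt_head ids s i hne hsa
    rw [hget] at hhd
    have hv : v = s.headI := Option.some_injective _ hhd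
    apply hc
    rw [PySem.Set.contains_iff, PySem.Set.mem_ofList, hv]
    exact List.mem_map_of_mem (List.mem_filter.mpr ⟨hmem, by simpa [List.isEmpty_iff] using hne⟩)

theorem pvAltLoop_char (ids : List Int) (seqs : List (List Int)) :
    ∀ (fuel : Nat) (i : Int), 0 ≤ i → (ids.length : Int) - i ≤ fuel →
      (pvAltLoop ids (PySem.Set.ofList ((seqs.filter (fun s => !s.isEmpty)).map (fun s => s.headI)))
          (seqs.filter (fun s => !s.isEmpty)) i fuel = (-1, none) ∧
        ∀ j : Int, i ≤ j → pvHit ids seqs j = none) ∨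
      (∃ j : Int, i ≤ j ∧ pvHit ids seqs j ≠ none ∧
        pvAltLoop ids (PySem.Set.ofList ((seqs.filter (fun s => !s.isEmpty)).map (fun s => s.headI)))
          (seqs.filter (fun s => !s.isEmpty)) i fuel = (j, pvHit ids seqs j) ∧
        ∀ j' : Int, i ≤ j' → j' < j → pvHit ids seqs j' = none) := by
  intro fuel
  induction fuel with
  | zero =>
    intro i h0 hfuel
    left
    exact ⟨rfl, fun j hj => pvHit_oob ids seqs j (by push_cast at hfuel; omega)⟩
  | succ fuel ih =>
    intro i h0 hfuel
    by_cases hin : i < (ids.length : Int)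
    · obtain ⟨v, hget⟩ : ∃ v, PySem.List.pyGet? ids i = some v := by
        cases h : PySem.List.pyGet? ids i with
        | none =>
          exfalso
          rw [PySem.List.pyGet?_eq_none_iff] at h
          exact h (by unfold PySem.Raise.InRange; omega)
        | some v => exact ⟨v, rfl⟩
      have h1 : pvAltLoop ids
          (PySem.Set.ofList ((seqs.filter (fun s => !s.isEmpty)).map (fun s => s.headI)))
          (seqs.filter (fun s => !s.isEmpty)) i (fuel + 1) =
          if PySem.Set.contains
              (PySem.Set.ofList ((seqs.filter (fun s => !s.isEmpty)).map (fun s => s.headI))) v = true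
          then (match pvAltInner ids i (seqs.filter (fun s => !s.isEmpty)) with
                | some s => (i, some s)
                | none => pvAltLoop ids
                    (PySem.Set.ofList ((seqs.filter (fun s => !s.isEmpty)).map (fun s => s.headI)))
                    (seqs.filter (fun s => !s.isEmpty)) (i + 1) fuel)
          else pvAltLoop ids
              (PySem.Set.ofList ((seqs.filter (fun s => !s.isEmpty)).map (fun s => s.headI)))
              (seqs.filter (fun s => !s.isEmpty)) (i + 1) fuel := by
        rw [pvAltLoop, if_pos hin, hget]
      by_cases hc : PySem.Set.contains
          (PySem.Set.ofList ((seqs.filter (fun s => !s.isEmpty)).map (fun s => s.headI))) v = true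
      · rw [h1, if_pos hc]
        cases hhit : pvHit ids seqs i with
        | some s =>
          have hstep : (match pvAltInner ids i (seqs.filter (fun s => !s.isEmpty)) with
              | some s => ((i : Int), some s)
              | none => pvAltLoop ids
                  (PySem.Set.ofList ((seqs.filter (fun s => !s.isEmpty)).map (fun s => s.headI)))
                  (seqs.filter (fun s => !s.isEmpty)) (i + 1) fuel) = (i, some s) := by
            rw [pvHit_eq_altInner ids seqs i h0, hhit]
          rw [hstep]
          right
          exact ⟨i, le_refl i, by simp [hhit], by rw [hhit],
            fun j' hj1 hj2 => absurd hj2 (by omega)⟩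
        | none =>
          have hstep : (match pvAltInner ids i (seqs.filter (fun s => !s.isEmpty)) with
              | some s => ((i : Int), some s)
              | none => pvAltLoop ids
                  (PySem.Set.ofList ((seqs.filter (fun s => !s.isEmpty)).map (fun s => s.headI)))
                  (seqs.filter (fun s => !s.isEmpty)) (i + 1) fuel) =
              pvAltLoop ids
                  (PySem.Set.ofList ((seqs.filter (fun s => !s.isEmpty)).map (fun s => s.headI)))
                  (seqs.filter (fun s => !s.isEmpty)) (i + 1) fuel := by
            rw [pvHit_eq_altInner ids seqs i h0, hhit]
          rw [hstep]
          rcases ih (i + 1) (by omega) (by push_cast at hfuel ⊢; omega) with ⟨h2, h3⟩ | ⟨j, h2, h3, h4, h5⟩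
          · left
            refine ⟨h2, fun j hj => ?_⟩
            rcases eq_or_lt_of_le hj with rfl | hlt
            · exact hhit
            · exact h3 j (by omega)
          · right
            refine ⟨j, by omega, h3, h4, fun j' hj1 hj2 => ?_⟩
            rcases eq_or_lt_of_le hj1 with rfl | hlt
            · exact hhit
            · exact h5 j' (by omega) hj2
      · have hhit : pvHit ids seqs i = none := pvHeads_miss ids seqs i v hget hc
        rw [h1, if_neg hc]
        rcases ih (i + 1) (by omega) (by push_cast at hfuel ⊢; omega) with ⟨h2, h3⟩ | ⟨j, h2, h3, h4, h5⟩
        · left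
          refine ⟨h2, fun j hj => ?_⟩
          rcases eq_or_lt_of_le hj with rfl | hlt
          · exact hhit
          · exact h3 j (by omega)
        · right
          refine ⟨j, by omega, h3, h4, fun j' hj1 hj2 => ?_⟩
          rcases eq_or_lt_of_le hj1 with rfl | hlt
          · exact hhit
          · exact h5 j' (by omega) hj2
    · have hstep : pvAltLoop ids
          (PySem.Set.ofList ((seqs.filter (fun s => !s.isEmpty)).map (fun s => s.headI)))
          (seqs.filter (fun s => !s.isEmpty)) i (fuel + 1) = (-1, none) := by
        cases fuel <;> · rw [pvAltLoop]; rw [if_neg hin]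
      rw [hstep]
      left
      exact ⟨rfl, fun j hj => pvHit_oob ids seqs j (by omega)⟩

def pvMerge (b r : Int × Option (List Int)) : Int × Option (List Int) :=
  if 0 ≤ r.1 ∧ (b.1 < 0 ∨ r.1 < b.1) then r else b

def pvCand (ids : List Int) (start : Int) (s : List Int) : Int × Option (List Int) :=
  if 0 ≤ pvFindFirstSeq ids s start then (pvFindFirstSeq ids s start, some s) else (-1, none)

theorem pvMerge_assoc (a b c : Int × Option (List Int)) :
    pvMerge (pvMerge a b) c = pvMerge a (pvMerge b c) := by
  simp only [pvMerge]; split_ifs <;> first | rfl | (exfalso; omega)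

theorem pvMerge_none (r : Int × Option (List Int)) : pvMerge r (-1, none) = r := by
  simp [pvMerge]

theorem pvMerge_none_cand (ids : List Int) (start : Int) (s : List Int) :
    pvMerge (-1, none) (pvCand ids start s) = pvCand ids start s := by
  rw [pvCand]
  split_ifs with h
  · simp [pvMerge, h]
  · simp [pvMerge]

theorem pvStep_eq (ids : List Int) (start : Int) (b : Int × Option (List Int)) (s : List Int) :
    (let idx := pvFindFirstSeq ids s start
      if 0 ≤ idx ∧ (b.1 < 0 ∨ idx < b.1) then (idx, some s) else b) =
    pvMerge b (pvCand ids start s) := by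
  simp only [pvCand, pvMerge]
  split_ifs <;> simp_all <;> omega

theorem pvFoldMerge_acc (ids : List Int) (start : Int) (l : List (List Int))
    (b : Int × Option (List Int)) :
    l.foldl (fun b s => pvMerge b (pvCand ids start s)) b =
    pvMerge b (l.foldl (fun b s => pvMerge b (pvCand ids start s)) (-1, none)) := by
  induction l generalizing b with
  | nil => simp [pvMerge_none]
  | cons s l ih =>
    simp only [List.foldl_cons]
    rw [ih (pvMerge b (pvCand ids start s)), ih (pvMerge (-1, none) (pvCand ids start s)),
      pvMerge_none_cand, pvMerge_assoc]

theorem pvFold_eq_merge (ids : List Int) (start : Int) (l : List (List Int))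
    (b : Int × Option (List Int)) :
    l.foldl (fun b s =>
        let idx := pvFindFirstSeq ids s start
        if 0 ≤ idx ∧ (b.1 < 0 ∨ idx < b.1) then (idx, some s) else b) b =
    pvMerge b (l.foldl (fun b s => pvMerge b (pvCand ids start s)) (-1, none)) := by
  rw [← pvFoldMerge_acc]
  congr 1
  funext b s
  exact pvStep_eq ids start b s

theorem pvMergeFold_char (ids : List Int) (start : Int) (l : List (List Int)) :
    (l.foldl (fun b s => pvMerge b (pvCand ids start s)) (-1, none) = (-1, none) ∧
      ∀ s ∈ l, pvFindFirstSeq ids s start < 0) ∨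
    (∃ j : Int, 0 ≤ j ∧
      l.foldl (fun b s => pvMerge b (pvCand ids start s)) (-1, none) =
        (j, l.find? (fun s => pvFindFirstSeq ids s start == j)) ∧
      l.find? (fun s => pvFindFirstSeq ids s start == j) ≠ none ∧
      ∀ s ∈ l, pvFindFirstSeq ids s start < 0 ∨ j ≤ pvFindFirstSeq ids s start) := by
  induction l with
  | nil => exact Or.inl ⟨rfl, by simp⟩
  | cons s l ih =>
    have hsplit : (s :: l).foldl (fun b s => pvMerge b (pvCand ids start s)) (-1, none) =
        pvMerge (pvCand ids start s) (l.foldl (fun b s => pvMerge b (pvCand ids start s)) (-1, none)) := by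
      rw [List.foldl_cons, pvMerge_none_cand, pvFoldMerge_acc]
    by_cases hg : 0 ≤ pvFindFirstSeq ids s start
    · rcases ih with ⟨h1, h2⟩ | ⟨j, hj0, h1, h2, h3⟩
      · -- rest has no match; result is (g s, some s)
        right
        refine ⟨pvFindFirstSeq ids s start, hg, ?_, ?_, ?_⟩
        · rw [hsplit, h1, pvMerge_none, pvCand, if_pos hg, List.find?_cons]
          simp only [beq_self_eq_true, cond_true]
        · rw [List.find?_cons]; simp
        · intro x hx
          rcases List.mem_cons.mp hx with rfl | hx
          · right; omega
          · left; exact h2 x hx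
      · by_cases hlt : j < pvFindFirstSeq ids s start
        · -- rest's minimum wins
          right
          refine ⟨j, hj0, ?_, ?_, ?_⟩
          · rw [hsplit, h1, pvMerge, pvCand, if_pos hg]
            simp only
            rw [if_pos ⟨hj0, Or.inr hlt⟩, List.find?_cons]
            have : (pvFindFirstSeq ids s start == j) = false := by simp; omega
            rw [this]
          · rw [List.find?_cons]
            have : (pvFindFirstSeq ids s start == j) = false := by simp; omega
            rw [this]
            exact h2
          · intro x hx
            rcases List.mem_cons.mp hx with rfl | hx
            · right; omega
            · exact h3 x hx
        · -- s itself wins (ties included: strict < fails)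
          right
          refine ⟨pvFindFirstSeq ids s start, hg, ?_, ?_, ?_⟩
          · rw [hsplit, h1, pvMerge, pvCand, if_pos hg]
            simp only
            rw [if_neg (by omega), List.find?_cons]
            simp
          · rw [List.find?_cons]; simp
          · intro x hx
            rcases List.mem_cons.mp hx with rfl | hx
            · right; omega
            · rcases h3 x hx with h | h
              · left; exact h
              · right; omega
    · -- s contributes nothing
      have hcand : pvCand ids start s = (-1, none) := by rw [pvCand, if_neg hg]
      rcases ih with ⟨h1, h2⟩ | ⟨j, hj0, h1, h2, h3⟩
      · left
        have heq : (s :: l).foldl (fun b s => pvMerge b (pvCand ids start s)) (-1, none) =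
            (-1, none) := by
          rw [hsplit, hcand, h1]
          simp [pvMerge]
        refine ⟨heq, ?_⟩
        intro x hx
        rcases List.mem_cons.mp hx with rfl | hx
        · omega
        · exact h2 x hx
      · right
        have heq : (s :: l).foldl (fun b s => pvMerge b (pvCand ids start s)) (-1, none) =
            (j, List.find? (fun s => pvFindFirstSeq ids s start == j) l) := by
          rw [hsplit, hcand, h1]
          simp [pvMerge, hj0]
        refine ⟨j, hj0, ?_, ?_, ?_⟩
        · rw [heq, List.find?_cons]
          have : (pvFindFirstSeq ids s start == j) = false := by simp; omega
          rw [this]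
        · rw [List.find?_cons]
          have : (pvFindFirstSeq ids s start == j) = false := by simp; omega
          rw [this]
          exact h2
        · intro x hx
          rcases List.mem_cons.mp hx with rfl | hx
          · left; omega
          · exact h3 x hx

theorem pvFind?_congr {α : Type} (p q : α → Bool) (l : List α)
    (h : ∀ x ∈ l, p x = q x) : l.find? p = l.find? q := by
  induction l with
  | nil => rfl
  | cons a l ih =>
    simp only [List.find?_cons, h a (by simp)]
    cases hq : q a <;> simp [ih (fun x hx => h x (by simp [hx]))]

theorem pvFindFirstSeq_nil (ids : List Int) (start : Int) :
    pvFindFirstSeq ids [] start = -1 := by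
  rw [pvFindFirstSeq, if_pos rfl]

theorem main_eq (ids : List Int) (seqs : List (List Int)) (start : Int)
    (hpre : Pre_find_first_seq_any_py ids seqs start) :
    find_first_seq_any_py ids seqs start = find_first_seq_any_py_alt ids seqs start := by
  -- abbreviations
  set i0 : Int := if 0 < start then start else 0 with hi0def
  have hi0a : start ≤ i0 := by rw [hi0def]; split_ifs <;> omega
  have hi0b : 0 ≤ i0 := by rw [hi0def]; split_ifs <;> omega
  have hi0c : ∀ j : Int, start ≤ j → 0 ≤ j → i0 ≤ j := by
    intro j h1 h2; rw [hi0def]; split_ifs <;> omega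
  -- per-pattern characterisation under Pre_
  have hchar : ∀ s ∈ seqs, s ≠ [] →
      (pvFindFirstSeq ids s start = -1 ∧ ∀ j : Int, start ≤ j → pvSeqAt ids j s = false) ∨
      (start ≤ pvFindFirstSeq ids s start ∧ 0 ≤ pvFindFirstSeq ids s start ∧
        pvSeqAt ids (pvFindFirstSeq ids s start) s = true ∧
        ∀ j : Int, start ≤ j → j < pvFindFirstSeq ids s start → pvSeqAt ids j s = false) := by
    intro s hmem hne
    refine pvFindFirstSeq_char ids s start hne (hpre.imp id (fun h => ?_))
    exact (h s hmem).resolve_left hne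
  -- rewrite A by the fold lemmas
  have hA : find_first_seq_any_py ids seqs start =
      pvMerge (-1, none) (seqs.foldl (fun b s => pvMerge b (pvCand ids start s)) (-1, none)) :=
    pvFold_eq_merge ids start seqs (-1, none)
  -- rewrite B by the loop characterisation
  have hBfuel : (ids.length : Int) - i0 ≤ (((ids.length : Int) - i0).toNat : Int) :=
    Int.self_le_toNat _
  have hB := pvAltLoop_char ids seqs (((ids.length : Int) - i0).toNat) i0 hi0b hBfuel
  have hBdef : find_first_seq_any_py_alt ids seqs start =
      pvAltLoop ids
        (PySem.Set.ofList ((seqs.filter (fun s => !s.isEmpty)).map (fun s => s.headI)))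
        (seqs.filter (fun s => !s.isEmpty)) i0 (((ids.length : Int) - i0).toNat) := rfl
  rcases pvMergeFold_char ids start seqs with ⟨hF, hall⟩ | ⟨j, hj0, hF, hFne, hmin⟩
  · -- A finds nothing
    have hBnone : ∀ j : Int, i0 ≤ j → pvHit ids seqs j = none := by
      intro j hj
      cases hhit : pvHit ids seqs j with
      | none => rfl
      | some s =>
        exfalso
        obtain ⟨hmem, hne, hsa⟩ := pvHit_elim ids seqs j s hhit
        rcases hchar s hmem hne with ⟨_, h2⟩ | ⟨_, hg0, _, _⟩
        · rw [h2 j (by omega)] at hsa; exact absurd hsa (by simp)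
        · exact absurd (hall s hmem) (by omega)
    rcases hB with ⟨h1, _⟩ | ⟨jB, hB1, hB2, _, _⟩
    · rw [hA, hF, hBdef, h1]; rfl
    · exact absurd (hBnone jB hB1) hB2
  · -- A finds the earliest position j
    -- the witness pattern found by A
    obtain ⟨s0, hs0⟩ : ∃ s0, seqs.find? (fun s => pvFindFirstSeq ids s start == j) = some s0 := by
      cases h : seqs.find? (fun s => pvFindFirstSeq ids s start == j) with
      | none => exact absurd h hFne
      | some s0 => exact ⟨s0, rfl⟩
    have hs0mem := List.mem_of_find?_eq_some hs0
    have hs0g : pvFindFirstSeq ids s0 start = j := by simpa using List.find?_some hs0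
    have hs0ne : s0 ≠ [] := by
      intro h; rw [h, pvFindFirstSeq_nil] at hs0g; omega
    have hs0sa : pvSeqAt ids j s0 = true := by
      rcases hchar s0 hs0mem hs0ne with ⟨h1, _⟩ | ⟨_, _, h3, _⟩
      · omega
      · rwa [hs0g] at h3
    have hjstart : start ≤ j := by
      rcases hchar s0 hs0mem hs0ne with ⟨h1, _⟩ | ⟨h1, _, _, _⟩
      · omega
      · omega
    have hji0 : i0 ≤ j := hi0c j hjstart hj0
    have hhitj : pvHit ids seqs j ≠ none := by
      intro h
      rw [pvHit, List.find?_eq_none] at h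
      have := h s0 hs0mem
      simp [List.isEmpty_iff, hs0ne, hs0sa] at this
    rcases hB with ⟨_, h2⟩ | ⟨jB, hB1, hB2, hB3, hB4⟩
    · exact absurd (h2 j hji0) hhitj
    · -- jB = j
      have hle1 : jB ≤ j := by
        by_contra hc
        exact hhitj (hB4 j hji0 (by omega))
      have hle2 : j ≤ jB := by
        obtain ⟨sB, hsB⟩ : ∃ sB, pvHit ids seqs jB = some sB := by
          cases h : pvHit ids seqs jB with
          | none => exact absurd h hB2
          | some sB => exact ⟨sB, rfl⟩
        obtain ⟨hBmem, hBne, hBsa⟩ := pvHit_elim ids seqs jB sB hsB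
        rcases hchar sB hBmem hBne with ⟨_, h2⟩ | ⟨h1, hg0, h3, h4⟩
        · rw [h2 jB (by omega)] at hBsa; exact absurd hBsa (by simp)
        · have hgle : pvFindFirstSeq ids sB start ≤ jB := by
            by_contra hc
            rw [h4 jB (by omega) (by omega)] at hBsa
            exact absurd hBsa (by simp)
          rcases hmin sB hBmem with h | h
          · omega
          · omega
      have hjeq : jB = j := by omega
      -- second components agree
      have hfind : pvHit ids seqs j =
          seqs.find? (fun s => pvFindFirstSeq ids s start == j) := by
        rw [pvHit]
        apply pvFind?_congr
        intro s hsmem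
        by_cases hne : s = []
        · subst hne
          simp [pvFindFirstSeq_nil]
          omega
        · have hnee : s.isEmpty = false := by simpa [List.isEmpty_iff] using hne
          cases hsa : pvSeqAt ids j s with
          | true =>
            have hg : pvFindFirstSeq ids s start = j := by
              rcases hchar s hsmem hne with ⟨_, h2⟩ | ⟨h1, hg0, h3, h4⟩
              · rw [h2 j (by omega)] at hsa; exact absurd hsa (by simp)
              · have hgle : pvFindFirstSeq ids s start ≤ j := by
                  by_contra hc
                  rw [h4 j (by omega) (by omega)] at hsa
                  exact absurd hsa (by simp)
                rcases hmin s hsmem with h | h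
                · omega
                · omega
            simp [hnee, hg]
          | false =>
            have hg : pvFindFirstSeq ids s start ≠ j := by
              intro h
              rcases hchar s hsmem hne with ⟨h1, _⟩ | ⟨_, _, h3, _⟩
              · omega
              · rw [h] at h3; rw [h3] at hsa; exact absurd hsa (by simp)
            simp [hnee, hg]
      rw [hA, hF, hBdef, hB3, hjeq, hfind, pvMerge, if_pos ⟨hj0, by norm_num⟩]

-- ===== VERDICT (by name: the statement is the Claim_ definition above) =====
theorem find_first_seq_any_py_spec : Claim_equal_find_first_seq_any_py := by
  intro ids seqs start _ hpre
  exact main_eq ids seqs start hpre
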